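-- pv_equiv track=rewrite | github.com/criscit/SomeProjects | Algorithms/Tinkoff/10.py | find_tink
-- ===== SOURCE A (Python) =====
-- def find_tink(s: str):
--     search = 'tinkoff'
--     out_s = ''
--     i = 0
--     for ch in s:
--         if i < len(search) and ch == search[i]:
--             i += 1
--             ch = ch.upper()
--
--
--         out_s += ch
--
--     if i == len(search):
--         return out_s
--     else:
--         return "IMPOSSIBLE"
-- ===== SOURCE B (Python) =====
-- def find_tink(s):
--     target = 'tinkoff'
--     matched = set()
--     j = 0
--     for idx, ch in enumerate(s):
--         if j < len(target) and ch == target[j]: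
--             matched.add(idx)
--             j += 1
--     if j < len(target):
--         return "IMPOSSIBLE"
--     return ''.join(c.upper() if i in matched else c for i, c in enumerate(s))
-- ===== Notes on version B (the rewrite author's own statement) =====
-- stated objective: alternative
-- what changed: Replaces A's single fused loop that mutates a growing output string with a two-phase algorithm: a first greedy pass collects the matched indices into a set, then a separate join-reconstruction pass uppercases exactly those indices.
import Mathlib
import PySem

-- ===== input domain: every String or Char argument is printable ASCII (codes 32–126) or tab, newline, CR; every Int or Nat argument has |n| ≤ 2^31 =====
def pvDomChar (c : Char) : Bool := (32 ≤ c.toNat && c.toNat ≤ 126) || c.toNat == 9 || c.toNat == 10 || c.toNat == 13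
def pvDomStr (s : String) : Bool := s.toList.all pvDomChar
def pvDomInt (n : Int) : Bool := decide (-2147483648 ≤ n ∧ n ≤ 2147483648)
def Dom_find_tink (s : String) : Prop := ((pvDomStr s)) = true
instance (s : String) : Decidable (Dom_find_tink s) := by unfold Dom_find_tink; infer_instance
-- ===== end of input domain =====

-- B restructures A's single fused accumulating loop into two passes (collect matched indices
-- into a set, then rebuild by join); objective: alternative (same result, different decomposition).

-- ===== PORT A =====
-- loop body of A: state (i, out_s); ch.upper() = upperChar (exact: ch is ASCII here whenever reached)
def stepA (st : Nat × List Char) (ch : Char) : Nat × List Char :=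
  if st.1 < ("tinkoff".toList).length ∧ ch = ("tinkoff".toList).getD st.1 ' '
  then (st.1 + 1, st.2 ++ [PySem.Chars.upperChar ch])
  else (st.1, st.2 ++ [ch])

def find_tink (s : String) : String :=
  let st := s.toList.foldl stepA (0, [])
  if st.1 = ("tinkoff".toList).length then String.mk st.2 else "IMPOSSIBLE"

-- ===== PORT B =====
-- loop body of B's first pass: state (matched, j)
def stepB (st : PySem.Set Int × Nat) (p : Int × Char) : PySem.Set Int × Nat :=
  if st.2 < ("tinkoff".toList).length ∧ p.2 = ("tinkoff".toList).getD st.2 ' '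
  then (PySem.Set.add st.1 p.1, st.2 + 1)
  else st

def find_tink_alt (s : String) : String :=
  let st := (PySem.List.enumerate s.toList 0).foldl stepB (PySem.Set.empty, 0)
  if st.2 < ("tinkoff".toList).length then "IMPOSSIBLE"
  else String.mk ((PySem.List.enumerate s.toList 0).map
    (fun p => if PySem.Set.contains st.1 p.1 then PySem.Chars.upperChar p.2 else p.2))

-- ===== PRECONDITION & SPEC =====
def Spec_find_tink (s : String) (out : String) : Prop := out = find_tink_alt s
instance (s : String) (out : String) : Decidable (Spec_find_tink s out) := by unfold Spec_find_tink; infer_instance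

-- ===== CLAIM (what is proved, stated in full; the proofs are below) =====
def Claim_equal_find_tink : Prop := ∀ (s : String), Dom_find_tink s → Spec_find_tink s (find_tink s)

-- ===== LEMMAS AND PROOFS =====

-- A's accumulator splits off
theorem foldA_acc (cs : List Char) (j : Nat) (out : List Char) :
    cs.foldl stepA (j, out) = ((cs.foldl stepA (j, [])).1, out ++ (cs.foldl stepA (j, [])).2) := by
  induction cs generalizing j out with
  | nil => simp
  | cons c cs ih =>
    simp only [List.foldl_cons, stepA]
    split
    · rw [ih (j+1) (out ++ [PySem.Chars.upperChar c]), ih (j+1) ([] ++ [PySem.Chars.upperChar c])]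
      simp
    · rw [ih j (out ++ [c]), ih j ([] ++ [c])]
      simp

-- A's pointer never exceeds 7
theorem foldA_le (cs : List Char) (j : Nat) (out : List Char) (h : j ≤ 7) :
    (cs.foldl stepA (j, out)).1 ≤ 7 := by
  induction cs generalizing j out with
  | nil => simpa using h
  | cons c cs ih =>
    simp only [List.foldl_cons, stepA]
    split
    · rename_i hc
      exact ih _ _ (by simpa using hc.1)
    · exact ih _ _ h

-- B's set only grows
theorem foldB_mono (l : List (Int × Char)) (m : PySem.Set Int) (j : Nat) (x : Int)
    (hx : x ∈ m) : x ∈ (l.foldl stepB (m, j)).1 := by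
  induction l generalizing m j with
  | nil => simpa using hx
  | cons p l ih =>
    simp only [List.foldl_cons, stepB]
    split
    · exact ih _ _ ((PySem.Set.mem_add _ _ _).2 (Or.inl hx))
    · exact ih _ _ hx

-- members of B's final set come from the initial set or the indices of the list
theorem foldB_mem (l : List (Int × Char)) (m : PySem.Set Int) (j : Nat) (x : Int)
    (hx : x ∈ (l.foldl stepB (m, j)).1) : x ∈ m ∨ x ∈ l.map (·.1) := by
  induction l generalizing m j with
  | nil => simp_all
  | cons p l ih =>
    simp only [List.foldl_cons, stepB] at hx
    split at hx
    · rcases ih _ _ hx with h | h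
      · rcases (PySem.Set.mem_add _ _ _).1 h with h | h
        · exact Or.inl h
        · exact Or.inr (by simp [h])
      · exact Or.inr (by simp [h])
    · rcases ih _ _ hx with h | h
      · exact Or.inl h
      · exact Or.inr (by simp [h])

-- main invariant: B's first pass ends at A's pointer, and B's reconstruction pass
-- rebuilds exactly A's output suffix
theorem main_inv (cs : List Char) (b : Int) (m : PySem.Set Int) (j : Nat)
    (hm : ∀ x ∈ m, x < b) :
    ((PySem.List.enumerate cs b).foldl stepB (m, j)).2 = (cs.foldl stepA (j, [])).1 ∧
    (PySem.List.enumerate cs b).map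
      (fun p => if PySem.Set.contains ((PySem.List.enumerate cs b).foldl stepB (m, j)).1 p.1
                then PySem.Chars.upperChar p.2 else p.2)
      = (cs.foldl stepA (j, [])).2 := by
  induction cs generalizing b m j with
  | nil => simp [PySem.List.enumerate_nil]
  | cons c cs ih =>
    rw [PySem.List.enumerate_cons]
    simp only [List.foldl_cons, List.map_cons]
    by_cases hc : j < ("tinkoff".toList).length ∧ c = ("tinkoff".toList).getD j ' '
    · have hb : b ∉ m := fun h => absurd (hm b h) (lt_irrefl b)
      have hstep : stepB (m, j) (b, c) = (m ++ [b], j + 1) := by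
        unfold stepB
        rw [if_pos hc, PySem.Set.add_of_not_mem hb]
      have hm' : ∀ x ∈ m ++ [b], x < b + 1 := by
        intro x hx
        rcases List.mem_append.1 hx with h | h
        · exact lt_trans (hm x h) (by omega)
        · simp at h; omega
      obtain ⟨ih1, ih2⟩ := ih (b + 1) (m ++ [b]) (j + 1) hm'
      have hA : stepA (j, ([] : List Char)) c = (j + 1, [PySem.Chars.upperChar c]) := by
        unfold stepA
        rw [if_pos hc]
        rfl
      simp only [hstep, hA]
      rw [foldA_acc cs (j+1) [PySem.Chars.upperChar c]]
      refine ⟨ih1, ?_⟩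
      have hbmem : b ∈ ((PySem.List.enumerate cs (b+1)).foldl stepB (m ++ [b], j+1)).1 :=
        foldB_mono _ _ _ _ (by simp)
      have hcb : PySem.Set.contains ((PySem.List.enumerate cs (b+1)).foldl stepB (m ++ [b], j+1)).1 b = true :=
        (PySem.Set.contains_iff _ _).2 hbmem
      rw [if_pos hcb, ih2]
      rfl
    · have hstep : stepB (m, j) (b, c) = (m, j) := by
        unfold stepB
        rw [if_neg hc]
      have hm' : ∀ x ∈ m, x < b + 1 := fun x hx => lt_trans (hm x hx) (by omega)
      obtain ⟨ih1, ih2⟩ := ih (b + 1) m j hm'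
      have hA : stepA (j, ([] : List Char)) c = (j, [c]) := by
        unfold stepA
        rw [if_neg hc]
        rfl
      simp only [hstep, hA]
      rw [foldA_acc cs j [c]]
      refine ⟨ih1, ?_⟩
      have hbnot : b ∉ ((PySem.List.enumerate cs (b+1)).foldl stepB (m, j)).1 := by
        intro h
        rcases foldB_mem _ _ _ _ h with h | h
        · exact absurd (hm b h) (lt_irrefl b)
        · rw [PySem.List.map_fst_enumerate] at h
          have := (PySem.List.mem_pyRange_one).1 h
          omega
      have hcb : ¬ (PySem.Set.contains ((PySem.List.enumerate cs (b+1)).foldl stepB (m, j)).1 b = true) :=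
        fun h => hbnot ((PySem.Set.contains_iff _ _).1 h)
      rw [if_neg hcb, ih2]
      rfl

-- ===== VERDICT (by name: the statement is the Claim_ definition above) =====
theorem find_tink_spec : Claim_equal_find_tink := by
  intro s _
  unfold Spec_find_tink find_tink find_tink_alt
  obtain ⟨h1, h2⟩ := main_inv s.toList 0 PySem.Set.empty 0
    (by intro x hx; simp [PySem.Set.empty] at hx)
  simp only [h1, h2]
  have hle : (s.toList.foldl stepA (0, [])).1 ≤ 7 := foldA_le _ _ _ (by omega)
  have hlen : ("tinkoff".toList).length = 7 := rfl
  by_cases h : (List.foldl stepA (0, []) s.toList).1 = 7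
  · rw [if_pos (by rw [hlen]; exact h), if_neg (by rw [hlen]; omega)]
  · rw [if_neg (by rw [hlen]; exact h), if_pos (by rw [hlen]; omega)]
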